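-- pv_equiv track=rewrite | github.com/ndalessio/Python_UNSAM | busqueda_en_listas.py | busqueda_lineal_ordenada
-- ===== SOURCE A (Python) =====
-- def busqueda_lineal_ordenada(lista, e):
--     '''Si e está en la lista devuelve su posición, de lo
--     contrario devuelve -1.
--     '''
--     lista.sort()
--
--     pos = -1  # comenzamos suponiendo que e no está
--     for i, z in enumerate(lista): # recorremos la lista
--         if i <= e:
--             if z == e:   # si encontramos a e
--                 pos = i  # guardamos su posición
--                 break    # y salimos del ciclo
--         elif i > e:
--             break
--     return pos
-- ===== SOURCE B (Python) =====
-- def busqueda_lineal_ordenada(lista, e):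
--     '''Si e esta en la lista devuelve su posicion, de lo
--     contrario devuelve -1.
--     '''
--     lista.sort()
--     lo, hi = 0, len(lista)
--     while lo < hi:
--         mid = (lo + hi) // 2
--         if lista[mid] < e:
--             lo = mid + 1
--         else:
--             hi = mid
--     if lo < len(lista) and lista[lo] == e:
--         return lo
--     return -1
-- ===== Notes on version B (the rewrite author's own statement) =====
-- stated objective: alternative
-- what changed: Replaces A's bounded linear scan of the sorted list by a hand-written binary search for the leftmost occurrence of e, dropping A's accidental 'index must not exceed e' cutoff.
-- intended difference: On inputs where e occurs in the list but its leftmost position in the sorted list is greater than e (e.g. any negative e that is present), A returns -1 because its loop breaks once the index exceeds the searched value, while B returns that true position, which is what the docstring ('if e is in the list return its position') promises. — e.g. on busqueda_lineal_ordenada([-3], -3): A returns -1, B returns 0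
import Mathlib
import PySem

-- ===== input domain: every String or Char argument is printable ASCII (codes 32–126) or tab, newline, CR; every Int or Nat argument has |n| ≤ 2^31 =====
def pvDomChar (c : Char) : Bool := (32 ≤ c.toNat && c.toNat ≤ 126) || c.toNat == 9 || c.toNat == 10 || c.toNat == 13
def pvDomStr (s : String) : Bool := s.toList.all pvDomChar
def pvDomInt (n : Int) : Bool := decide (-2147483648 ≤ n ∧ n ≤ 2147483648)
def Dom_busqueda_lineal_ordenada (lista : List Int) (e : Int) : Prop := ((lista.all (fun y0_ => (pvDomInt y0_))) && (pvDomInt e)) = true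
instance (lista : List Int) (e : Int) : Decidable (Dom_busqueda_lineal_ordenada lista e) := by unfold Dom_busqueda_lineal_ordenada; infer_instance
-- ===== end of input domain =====

-- B replaces A's bounded linear scan of the sorted list by a binary search for the leftmost
-- occurrence of e, and drops A's accidental 'index must not exceed e' cutoff (stated as D_ below).
-- Both versions sort the argument list in place in Python; the equivalence proved here is about the return value.

-- ===== PORT A =====
-- the for-loop over enumerate(lista) with its two breaks; i is the running index
def busqueda_lineal_ordenada_loop (e : Int) : List Int → Nat → Int
  | [], _ => -1
  | z :: rest, i =>
      if (i : Int) ≤ e then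
        (if z = e then (i : Int) else busqueda_lineal_ordenada_loop e rest (i + 1))
      else -1  -- elif i > e: break (pos stays -1)

def busqueda_lineal_ordenada (lista : List Int) (e : Int) : Int :=
  busqueda_lineal_ordenada_loop e (PySem.List.sorted lista (fun x => x) false) 0

-- ===== PORT B =====
-- the while-loop of Source B; lista[mid] is always in range (lo < hi ≤ len), so getD is exact;
-- fuel only makes the recursion structural (each step shrinks hi-lo, so fuel = length suffices)
def busqueda_bsearch (s : List Int) (e : Int) : Nat → Nat → Nat → Nat
  | 0, lo, _ => lo
  | fuel + 1, lo, hi =>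
    if lo < hi then
      let mid := (lo + hi) / 2
      if s.getD mid 0 < e then busqueda_bsearch s e fuel (mid + 1) hi
      else busqueda_bsearch s e fuel lo mid
    else lo

def busqueda_lineal_ordenada_alt (lista : List Int) (e : Int) : Int :=
  let s := PySem.List.sorted lista (fun x => x) false   -- lista.sort()
  let lo := busqueda_bsearch s e s.length 0 s.length
  if lo < s.length ∧ s.getD lo 0 = e then (lo : Int) else -1

-- ===== PRECONDITION & SPEC =====
-- On inputs where e occurs in the list but its leftmost position in the sorted list is greater
-- than e (e.g. any negative e that is present), A returns -1 because its loop breaks once the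
-- index exceeds the searched value, while B returns that true position, which is what the
-- docstring ('if e is in the list return its position') promises.
def D_busqueda_lineal_ordenada (lista : List Int) (e : Int) : Prop :=
  e ∈ lista ∧ e < (lista.countP (fun z => decide (z < e)) : Int)
instance (lista : List Int) (e : Int) : Decidable (D_busqueda_lineal_ordenada lista e) := by
  unfold D_busqueda_lineal_ordenada; infer_instance

def Spec_busqueda_lineal_ordenada (lista : List Int) (e : Int) (out : Int) : Prop :=
  ¬ D_busqueda_lineal_ordenada lista e → out = busqueda_lineal_ordenada_alt lista e
instance (lista : List Int) (e : Int) (out : Int) : Decidable (Spec_busqueda_lineal_ordenada lista e out) := by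
  unfold Spec_busqueda_lineal_ordenada; infer_instance

def pvDiffWitness_busqueda_lineal_ordenada : List Int × Int := ([-3], -3)
def pvDiffWitnessOut_busqueda_lineal_ordenada : Int × Int := (-1, 0)

-- ===== CLAIM =====
def Claim_unchanged_busqueda_lineal_ordenada : Prop := ∀ (lista : List Int) (e : Int), Dom_busqueda_lineal_ordenada lista e → Spec_busqueda_lineal_ordenada lista e (busqueda_lineal_ordenada lista e)
def Claim_changed_busqueda_lineal_ordenada : Prop := Dom_busqueda_lineal_ordenada (pvDiffWitness_busqueda_lineal_ordenada.1) (pvDiffWitness_busqueda_lineal_ordenada.2) ∧ D_busqueda_lineal_ordenada (pvDiffWitness_busqueda_lineal_ordenada.1) (pvDiffWitness_busqueda_lineal_ordenada.2) ∧ busqueda_lineal_ordenada (pvDiffWitness_busqueda_lineal_ordenada.1) (pvDiffWitness_busqueda_lineal_ordenada.2) = pvDiffWitnessOut_busqueda_lineal_ordenada.1 ∧ busqueda_lineal_ordenada_alt (pvDiffWitness_busqueda_lineal_ordenada.1) (pvDiffWitness_busqueda_lineal_ordenada.2) = pvDiffWitnessOut_busqueda_lineal_ordenada.2 ∧ pvDiffWitnessOut_busqueda_lineal_ordenada.1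 ≠ pvDiffWitnessOut_busqueda_lineal_ordenada.2
def Claim_exact_busqueda_lineal_ordenada : Prop := ∀ (lista : List Int) (e : Int), Dom_busqueda_lineal_ordenada lista e → D_busqueda_lineal_ordenada lista e → busqueda_lineal_ordenada lista e ≠ busqueda_lineal_ordenada_alt lista e

-- ===== LEMMAS AND PROOFS =====

-- On a sorted list, A's bounded scan started at index i returns i + (#elements < e)
-- when e occurs and that index is ≤ e, and -1 otherwise.
theorem busqueda_loop_eq (e : Int) :
    ∀ (s : List Int), s.Pairwise (· ≤ ·) → ∀ (i : Nat),
      busqueda_lineal_ordenada_loop e s i =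
        if e ∈ s ∧ (i : Int) + (s.countP (fun z => decide (z < e)) : Nat) ≤ e
        then (i : Int) + (s.countP (fun z => decide (z < e)) : Nat) else -1 := by
  intro s
  induction s with
  | nil => intro _ i; simp [busqueda_lineal_ordenada_loop]
  | cons z rest ih =>
    intro hp i
    have hrest : rest.Pairwise (· ≤ ·) := (List.pairwise_cons.mp hp).2
    have hall : ∀ x ∈ rest, z ≤ x := (List.pairwise_cons.mp hp).1
    by_cases hie : (i : Int) ≤ e
    · by_cases hz : z = e
      · have hc0 : rest.countP (fun z => decide (z < e)) = 0 := by
          rw [List.countP_eq_zero]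
          intro x hx
          have := hall x hx
          simp only [decide_eq_true_eq]
          omega
        simp [busqueda_lineal_ordenada_loop, hie, hz, hc0]
      · rw [busqueda_lineal_ordenada_loop, if_pos hie, if_neg hz, ih hrest (i + 1)]
        by_cases hlt : z < e
        · have hc : (z :: rest).countP (fun z => decide (z < e))
              = rest.countP (fun z => decide (z < e)) + 1 := by
            simp [hlt]
          have hmem : e ∈ z :: rest ↔ e ∈ rest := by simp [List.mem_cons, Ne.symm hz]
          rw [hc]
          by_cases hm : e ∈ rest
          · have hm' : e ∈ z :: rest := hmem.mpr hm
            simp only [hm, hm', true_and]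
            by_cases hle : (i : Int) + (rest.countP (fun z => decide (z < e)) : Nat) + 1 ≤ e
            · rw [if_pos (by push_cast; omega), if_pos (by push_cast; omega)]
              push_cast; ring
            · rw [if_neg (by push_cast; omega), if_neg (by push_cast; omega)]
          · simp [hm, hmem]
        · have hgt : e < z := by omega
          have hnm : e ∉ rest := fun h => absurd (hall e h) (by omega)
          have hnm' : e ∉ z :: rest := by simp [List.mem_cons, Ne.symm hz, hnm]
          simp [hnm, hnm']
    · rw [busqueda_lineal_ordenada_loop, if_neg hie]
      have : ¬ ((i : Int) + ((z :: rest).countP (fun z => decide (z < e)) : Nat) ≤ e) := by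
        have : (0 : Int) ≤ ((z :: rest).countP (fun z => decide (z < e)) : Nat) := Int.natCast_nonneg _
        omega
      simp [this]

-- B's binary search preserves its invariant and lands on the boundary index.
theorem busqueda_bsearch_spec (s : List Int) (e : Int)
    (hs : s.Pairwise (· ≤ ·)) :
    ∀ (fuel lo hi : Nat), hi - lo ≤ fuel → lo ≤ hi → hi ≤ s.length →
      (∀ i, i < lo → s.getD i 0 < e) →
      (∀ i, hi ≤ i → i < s.length → ¬ s.getD i 0 < e) →
      (∀ i, i < busqueda_bsearch s e fuel lo hi → s.getD i 0 < e) ∧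
      (∀ i, busqueda_bsearch s e fuel lo hi ≤ i → i < s.length → ¬ s.getD i 0 < e) ∧
      busqueda_bsearch s e fuel lo hi ≤ s.length := by
  have hmono : ∀ p q : Nat, p ≤ q → q < s.length → s.getD p 0 ≤ s.getD q 0 := by
    intro p q hpq hq
    have hp : p < s.length := lt_of_le_of_lt hpq hq
    rw [List.getD_eq_getElem _ _ hp, List.getD_eq_getElem _ _ hq]
    rcases Nat.lt_or_ge p q with h | h
    · exact List.pairwise_iff_getElem.mp hs p q hp hq h
    · have : p = q := le_antisymm hpq h
      subst this; rfl
  intro fuel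
  induction fuel with
  | zero =>
    intro lo hi hn hlohi hhilen hlow hhigh
    have : lo = hi := by omega
    subst this
    exact ⟨hlow, hhigh, le_trans hlohi hhilen⟩
  | succ fuel ih =>
    intro lo hi hn hlohi hhilen hlow hhigh
    rw [busqueda_bsearch]
    by_cases h : lo < hi
    · rw [if_pos h]
      set mid := (lo + hi) / 2 with hmid
      have hmlt : mid < hi := by omega
      have hmge : lo ≤ mid := by omega
      have hmlen : mid < s.length := lt_of_lt_of_le hmlt hhilen
      by_cases hc : s.getD mid 0 < e
      · rw [if_pos hc]
        refine ih (mid + 1) hi (by omega) (by omega) hhilen ?_ hhigh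
        intro i hi'
        rcases Nat.lt_or_ge i lo with h' | h'
        · exact hlow i h'
        · exact lt_of_le_of_lt (hmono i mid (by omega) hmlen) hc
      · rw [if_neg hc]
        refine ih lo mid (by omega) hmge (le_of_lt hmlen) hlow ?_
        intro i hmi hilen hcon
        exact hc (lt_of_le_of_lt (hmono mid i hmi hilen) hcon)
    · rw [if_neg h]
      have : lo = hi := by omega
      subst this
      exact ⟨hlow, hhigh, le_trans hlohi hhilen⟩

-- A list all of whose first r positions satisfy p and none of the rest has countP p = r.
theorem countP_eq_of_boundary (p : Int → Bool) :
    ∀ (s : List Int) (r : Nat), r ≤ s.length →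
      (∀ i, i < r → p (s.getD i 0) = true) →
      (∀ i, r ≤ i → i < s.length → ¬ p (s.getD i 0) = true) →
      s.countP p = r := by
  intro s
  induction s with
  | nil =>
    intro r hr _ _
    simp only [List.length_nil, Nat.le_zero] at hr
    simp [hr]
  | cons a t ih =>
    intro r hr h1 h2
    cases r with
    | zero =>
      rw [List.countP_eq_zero]
      intro x hx
      obtain ⟨i, hi, hxe⟩ := List.mem_iff_getElem.mp hx
      have := h2 i (Nat.zero_le _) hi
      rw [List.getD_eq_getElem _ _ hi, hxe] at this
      exact fun hpx => this hpx
    | succ r' =>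
      have hpa : p a = true := by
        have := h1 0 (Nat.succ_pos _) ; simpa using this
      have ht : t.countP p = r' := by
        refine ih r' (by simpa using hr) ?_ ?_
        · intro i hi
          have := h1 (i + 1) (by omega)
          simpa using this
        · intro i hi hilen
          have := h2 (i + 1) (by omega) (by simpa using Nat.succ_lt_succ hilen)
          simpa using this
      rw [List.countP_cons, hpa, ht]
      simp

-- ===== VERDICT =====
theorem busqueda_lineal_ordenada_spec : Claim_unchanged_busqueda_lineal_ordenada := by
  intro lista e _ hnD
  unfold busqueda_lineal_ordenada busqueda_lineal_ordenada_alt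
  set s := PySem.List.sorted lista (fun x => x) false with hsdef
  have hp : s.Pairwise (· ≤ ·) := PySem.List.sorted_pairwise lista (fun x => x)
  set r := busqueda_bsearch s e s.length 0 s.length with hrdef
  obtain ⟨hlow, hhigh, hrlen⟩ := busqueda_bsearch_spec s e hp s.length 0 s.length (by omega) (Nat.zero_le _) le_rfl (by omega) (fun i hi hilen => absurd hilen (by omega))
  have hrc : s.countP (fun z => decide (z < e)) = r :=
    countP_eq_of_boundary _ s r hrlen (fun i hi => by simpa using hlow i hi) (fun i h1 h2 => by simpa using hhigh i h1 h2)
  have hmemiff : e ∈ s ↔ e ∈ lista := PySem.List.mem_sorted lista (fun x => x) false e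
  have hcount : lista.countP (fun z => decide (z < e)) = s.countP (fun z => decide (z < e)) :=
    ((PySem.List.sorted_perm lista (fun x => x) false).countP_eq _).symm
  rw [busqueda_loop_eq e s hp 0]
  by_cases hm : e ∈ s
  · -- e occurs; its leftmost position in s is r
    have hfound : r < s.length ∧ s.getD r 0 = e := by
      obtain ⟨i, hi, hxe⟩ := List.mem_iff_getElem.mp hm
      have hri : r ≤ i := by
        by_contra hcon
        have := hlow i (by omega)
        rw [List.getD_eq_getElem _ _ hi, hxe] at this
        omega
      have hrlt : r < s.length := lt_of_le_of_lt hri hi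
      refine ⟨hrlt, ?_⟩
      have h1 : ¬ s.getD r 0 < e := hhigh r le_rfl hrlt
      have h2 : s.getD r 0 ≤ e := by
        rw [List.getD_eq_getElem _ _ hrlt]
        calc s[r] ≤ s[i] := by
              rcases Nat.lt_or_ge r i with h | h
              · exact List.pairwise_iff_getElem.mp hp r i hrlt hi h
              · have : r = i := le_antisymm hri h
                subst this; rfl
          _ = e := hxe
      omega
    have hcle : (r : Int) ≤ e := by
      have : ¬ D_busqueda_lineal_ordenada lista e := hnD
      unfold D_busqueda_lineal_ordenada at this
      push Not at this
      have := this (hmemiff.mp hm)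
      rw [hcount, hrc] at this
      exact this
    rw [if_pos ⟨hm, by rw [hrc]; omega⟩, if_pos hfound, hrc]
    omega
  · -- e absent: both -1
    rw [if_neg (fun hcon => hm hcon.1)]
    rw [if_neg ?_]
    rintro ⟨hrl, hre⟩
    exact hm (by rw [← hre]; rw [List.getD_eq_getElem _ _ hrl]; exact List.getElem_mem hrl)

theorem busqueda_lineal_ordenada_changed : Claim_changed_busqueda_lineal_ordenada := by
  unfold Claim_changed_busqueda_lineal_ordenada
  decide

theorem busqueda_lineal_ordenada_tight : Claim_exact_busqueda_lineal_ordenada := by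
  intro lista e _ hD
  obtain ⟨hm, hgt⟩ := hD
  unfold busqueda_lineal_ordenada busqueda_lineal_ordenada_alt
  set s := PySem.List.sorted lista (fun x => x) false with hsdef
  have hp : s.Pairwise (· ≤ ·) := PySem.List.sorted_pairwise lista (fun x => x)
  have hcount : lista.countP (fun z => decide (z < e)) = s.countP (fun z => decide (z < e)) :=
    ((PySem.List.sorted_perm lista (fun x => x) false).countP_eq _).symm
  rw [busqueda_loop_eq e s hp 0]
  have hA : ¬ ((0 : Int) + (s.countP (fun z => decide (z < e)) : Nat) ≤ e) := by
    rw [← hcount]; omega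
  rw [if_neg (fun hcon => hA hcon.2)]
  -- A gives -1; B gives a nonnegative index or -1, but here e ∈ s so B gives ≥ 0
  set r := busqueda_bsearch s e s.length 0 s.length with hrdef
  obtain ⟨hlow, hhigh, hrlen⟩ := busqueda_bsearch_spec s e hp s.length 0 s.length (by omega) (Nat.zero_le _) le_rfl (by omega) (fun i hi hilen => absurd hilen (by omega))
  have hms : e ∈ s := (PySem.List.mem_sorted lista (fun x => x) false e).mpr hm
  have hfound : r < s.length ∧ s.getD r 0 = e := by
    obtain ⟨i, hi, hxe⟩ := List.mem_iff_getElem.mp hms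
    have hri : r ≤ i := by
      by_contra hcon
      have := hlow i (by omega)
      rw [List.getD_eq_getElem _ _ hi, hxe] at this
      omega
    have hrlt : r < s.length := lt_of_le_of_lt hri hi
    refine ⟨hrlt, ?_⟩
    have h1 : ¬ s.getD r 0 < e := hhigh r le_rfl hrlt
    have h2 : s.getD r 0 ≤ e := by
      rw [List.getD_eq_getElem _ _ hrlt]
      calc s[r] ≤ s[i] := by
            rcases Nat.lt_or_ge r i with h | h
            · exact List.pairwise_iff_getElem.mp hp r i hrlt hi h
            · have : r = i := le_antisymm hri h
              subst this; rfl
        _ = e := hxe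
    omega
  rw [if_pos hfound]
  intro hcon
  have : (-1 : Int) = (r : Nat) := hcon
  omega
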